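-- pv_equiv track=rewrite | github.com/ketankvishwakarma/data-structures-and-algo | basic_algorithms/count_unique.py | count
-- ===== SOURCE A (Python) =====
-- def count(input_array):
--     if len(input_array) ==0:
--         return 0
--     unique_count = 1
--     for index,value in enumerate(input_array):
--         if index == (len(input_array)-1):
--             break
--         if value == input_array[index+1]:
--             continue
--         if value !=input_array[index+1]:
--             unique_count=unique_count+1
--     return unique_count
-- ===== SOURCE B (Python) =====
-- def count(input_array):
--     # Count maximal runs of equal adjacent elements by skipping each run.
--     n = len(input_array)
--     total = 0
--     i = 0
--     while i < n:
--         x = input_array[i]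
--         while i < n and input_array[i] == x:
--             i += 1
--         total += 1
--     return total
-- ===== Notes on version B (the rewrite author's own statement) =====
-- stated objective: simpler
-- what changed: B counts maximal runs by skipping each run of equal elements (a group-by scan), instead of A's enumerate loop that compares each element with its successor and needs a separate empty-list guard and a break at the last index.
import Mathlib
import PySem

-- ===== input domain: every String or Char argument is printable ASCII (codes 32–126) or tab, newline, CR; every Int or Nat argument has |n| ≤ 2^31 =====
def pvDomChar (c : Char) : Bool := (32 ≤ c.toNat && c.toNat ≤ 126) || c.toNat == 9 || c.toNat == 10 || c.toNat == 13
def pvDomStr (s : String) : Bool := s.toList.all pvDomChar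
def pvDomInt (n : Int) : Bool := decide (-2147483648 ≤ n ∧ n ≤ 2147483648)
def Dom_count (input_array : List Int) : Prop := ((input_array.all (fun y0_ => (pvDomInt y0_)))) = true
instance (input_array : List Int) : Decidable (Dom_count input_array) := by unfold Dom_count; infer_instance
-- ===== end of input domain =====

-- B counts maximal runs of equal adjacent elements by a group-by scan; simpler than
-- A's enumerate loop with a successor comparison, a break and an empty-list guard.

-- ===== PORT A =====
-- the 'for index,value in enumerate(...)' loop; 'break' at the last index returns the
-- accumulator; input_array[index+1] is always in range there, ported with pyGetD
def countLoopA (arr : List Int) (pairs : List (Int × Int)) (acc : Int) : Int :=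
  match pairs with
  | [] => acc
  | (i, v) :: rest =>
    if i = (arr.length : Int) - 1 then acc
    else if v = PySem.List.pyGetD arr (i + 1) 0 then countLoopA arr rest acc
    else if v ≠ PySem.List.pyGetD arr (i + 1) 0 then countLoopA arr rest (acc + 1)
    else countLoopA arr rest acc

def count (input_array : List Int) : Int :=
  if input_array.length = 0 then 0
  else countLoopA input_array (PySem.List.enumerate input_array 0) 1

-- ===== PORT B =====
-- outer while loop: count 1 for the run starting at the head, skip the run
-- (the inner while loop = dropWhile), recurse on what remains
def countRuns : List Int → Int
  | [] => 0
  | x :: rest => 1 + countRuns (rest.dropWhile (fun y => y == x))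
termination_by l => l.length
decreasing_by
  exact Nat.lt_succ_of_le (List.length_dropWhile_le _ rest)

def count_alt (input_array : List Int) : Int := countRuns input_array

-- ===== PRECONDITION & SPEC =====
def Spec_count (input_array : List Int) (out : Int) : Prop := out = count_alt input_array
instance (input_array : List Int) (out : Int) : Decidable (Spec_count input_array out) := by unfold Spec_count; infer_instance

-- ===== CLAIM (what is proved, stated in full; the proofs are below) =====
def Claim_equal_count : Prop := ∀ (input_array : List Int), Dom_count input_array → Spec_count input_array (count input_array)

-- ===== LEMMAS AND PROOFS =====

-- number of adjacent unequal pairs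
def transCnt : List Int → Int
  | [] => 0
  | [_] => 0
  | x :: y :: r => (if x = y then 0 else 1) + transCnt (y :: r)

lemma countLoopA_eq (s : List Int) : ∀ (pre : List Int) (acc : Int),
    countLoopA (pre ++ s) (PySem.List.enumerate s (pre.length : Int)) acc = acc + transCnt s := by
  induction s with
  | nil => intro pre acc; simp [countLoopA, transCnt, PySem.List.enumerate]
  | cons v s' ih =>
    intro pre acc
    rw [PySem.List.enumerate_cons]
    cases s' with
    | nil =>
      simp [countLoopA, transCnt]
    | cons w s'' =>
      have hne : (pre.length : Int) ≠ ((pre ++ v :: w :: s'').length : Int) - 1 := by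
        simp; omega
      have hget : PySem.List.pyGetD (pre ++ v :: w :: s'') ((pre.length : Int) + 1) 0 = w := by
        have : ((pre.length : Int) + 1) = (((pre ++ [v]).length : Nat) : Int) := by
          simp
        rw [this, PySem.List.pyGetD_natCast]
        have : pre ++ v :: w :: s'' = (pre ++ [v]) ++ w :: s'' := by simp
        rw [this]
        simp [List.getD]
      have ihv := ih (pre ++ [v])
      simp only [List.append_assoc, List.cons_append, List.nil_append, List.length_append,
        List.length_cons, List.length_nil] at ihv
      unfold countLoopA
      rw [if_neg hne, hget]
      by_cases hvw : v = w
      · rw [if_pos hvw]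
        have := ihv acc
        push_cast at this
        rw [show (pre.length : Int) + 1 = (pre.length : Int) + (0 + 1) by ring] at this ⊢
        rw [this]
        simp [transCnt, hvw]
      · rw [if_neg hvw, if_pos hvw]
        have := ihv (acc + 1)
        push_cast at this
        rw [show (pre.length : Int) + 1 = (pre.length : Int) + (0 + 1) by ring] at this ⊢
        rw [this]
        simp [transCnt, hvw]; ring

lemma transCnt_cons_eq_countRuns (rest : List Int) : ∀ x : Int,
    transCnt (x :: rest) = countRuns (rest.dropWhile (fun y => y == x)) := by
  induction rest with
  | nil => intro x; simp [transCnt, countRuns]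
  | cons y r ih =>
    intro x
    by_cases hxy : y = x
    · simp only [List.dropWhile_cons, hxy, beq_self_eq_true, if_pos]
      rw [show transCnt (x :: x :: r) = 0 + transCnt (x :: r) by simp [transCnt], ih x]
      simp
    · have hb : (y == x) = false := by simp [hxy]
      simp only [List.dropWhile_cons, hb, Bool.false_eq_true, if_neg, not_false_iff]
      rw [show transCnt (x :: y :: r) = 1 + transCnt (y :: r) by simp [transCnt]; intro h; exact hxy h.symm]
      rw [ih y]
      rw [show countRuns (y :: r) = 1 + countRuns (r.dropWhile (fun z => z == y)) from by rw [countRuns]]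

lemma count_eq_countRuns (l : List Int) : count l = countRuns l := by
  cases l with
  | nil => simp [count, countRuns]
  | cons x rest =>
    have h := countLoopA_eq (x :: rest) [] 1
    simp only [List.nil_append, List.length_nil, Nat.cast_zero] at h
    rw [count, if_neg (by simp), h, show countRuns (x :: rest) = 1 + countRuns (rest.dropWhile (fun y => y == x)) from by rw [countRuns], transCnt_cons_eq_countRuns rest x]

-- ===== VERDICT (by name: the statement is the Claim_ definition above) =====
theorem count_spec : Claim_equal_count := by
  intro input_array _
  unfold Spec_count count_alt
  exact count_eq_countRuns input_array
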